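-- pv_equiv track=rewrite | github.com/emrekuruu/openclaw-job-search-plugin | skills/cv-tailoring-skill/scripts/tailor_cv.py | score_line
-- ===== SOURCE A (Python) =====
-- def score_line(line: str, keywords):
--     lowered = line.lower()
--     score = 0
--     hits = []
--     for kw in keywords:
--         if kw in lowered:
--             score += 1
--             hits.append(kw)
--     return score, hits
-- ===== SOURCE B (Python) =====
-- def score_line(line: str, keywords):
--     lowered = line.lower()
--     subs = set()
--     for l in set(len(kw) for kw in keywords):
--         for i in range(len(lowered) - l + 1):
--             subs.add(lowered[i:i + l])
--     hits = [kw for kw in keywords if kw in subs]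
--     return len(hits), hits
-- ===== Notes on version B (the rewrite author's own statement) =====
-- stated objective: faster
-- what changed: B precomputes one hash set of all substrings of the lowered line whose length is one of the distinct keyword lengths, then filters the keyword list by a single set-membership lookup each, so A's per-keyword substring search over the whole line disappears.
import Mathlib
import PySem

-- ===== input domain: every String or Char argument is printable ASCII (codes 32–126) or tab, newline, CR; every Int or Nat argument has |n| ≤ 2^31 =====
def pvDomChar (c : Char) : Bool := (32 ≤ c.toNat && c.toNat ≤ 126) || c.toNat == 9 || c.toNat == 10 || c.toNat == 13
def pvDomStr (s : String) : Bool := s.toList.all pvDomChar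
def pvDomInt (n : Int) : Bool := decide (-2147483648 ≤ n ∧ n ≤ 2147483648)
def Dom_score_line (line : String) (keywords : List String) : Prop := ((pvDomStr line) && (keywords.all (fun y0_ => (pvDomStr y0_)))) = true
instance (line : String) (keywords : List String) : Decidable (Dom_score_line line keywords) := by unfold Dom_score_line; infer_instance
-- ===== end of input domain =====

-- B precomputes the set of all substrings of the lowered line whose length is a keyword length
-- (one slicing pass per distinct length), then filters the keyword list by set membership
-- (objective: faster — the per-keyword substring search disappears; constant/asymptotic in K).

-- ===== PORT A =====
def score_line (line : String) (keywords : List String) : Int × List String :=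
  let lowered := PySem.Str.lower line
  let r := keywords.foldl
    (fun (acc : Int × List String) kw =>
      if PySem.Str.isIn kw lowered then (acc.1 + 1, acc.2 ++ [kw]) else acc)
    (0, [])
  r

-- ===== PORT B =====
-- strings are handled as their char lists (Python string equality = char-list equality)
def score_line_alt (line : String) (keywords : List String) : Int × List String :=
  let lowered := (PySem.Str.lower line).toList
  let lengths : PySem.Set Int := PySem.Set.ofList (keywords.map (fun kw => (kw.toList.length : Int)))
  let subs := lengths.foldl
    (fun (s : PySem.Set (List Char)) l =>
      (PySem.List.pyRange 0 ((lowered.length : Int) - l + 1) 1).foldl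
        (fun (s : PySem.Set (List Char)) i =>
          PySem.Set.add s (PySem.List.slice lowered (some i) (some (i + l))))
        s)
    PySem.Set.empty
  let hits := keywords.filter (fun kw => PySem.Set.contains subs kw.toList)
  ((hits.length : Int), hits)

-- ===== PRECONDITION & SPEC =====
def Spec_score_line (line : String) (keywords : List String) (out : Int × List String) : Prop := out = score_line_alt line keywords
instance (line : String) (keywords : List String) (out : Int × List String) : Decidable (Spec_score_line line keywords out) := by unfold Spec_score_line; infer_instance

-- ===== CLAIM (what is proved, stated in full; the proofs are below) =====
def Claim_equal_score_line : Prop := ∀ (line : String) (keywords : List String), Dom_score_line line keywords → Spec_score_line line keywords (score_line line keywords)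

-- ===== LEMMAS AND PROOFS =====

-- A's loop invariant: starting from (s, h), the fold returns the count added to s and the filtered keywords appended to h.
theorem score_line_foldl_eq (p : String → Bool) (ks : List String) (s : Int) (h : List String) :
    ks.foldl
      (fun (acc : Int × List String) kw =>
        if p kw then (acc.1 + 1, acc.2 ++ [kw]) else acc)
      (s, h)
    = (s + ((ks.filter p).length : Int), h ++ ks.filter p) := by
  induction ks generalizing s h with
  | nil => simp
  | cons k ks ih =>
    simp only [List.foldl_cons, List.filter_cons]
    by_cases hk : p k
    · rw [if_pos hk, if_pos hk, ih]
      refine Prod.ext ?_ (by simp)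
      simp; ring
    · rw [if_neg hk, if_neg hk, ih]

-- B's inner loop: membership in the set after adding f i for every i of the list.
theorem mem_add_fold {β : Type} (f : β → List Char) (js : List β) (s : PySem.Set (List Char)) (x : List Char) :
    (x ∈ js.foldl (fun (s : PySem.Set (List Char)) i => PySem.Set.add s (f i)) s)
      ↔ x ∈ s ∨ ∃ i ∈ js, x = f i := by
  induction js generalizing s with
  | nil => simp
  | cons j js ih =>
    simp only [List.foldl_cons, ih, PySem.Set.mem_add, List.mem_cons]
    constructor
    · rintro ((h | h) | ⟨i, hi, h⟩)
      · exact Or.inl h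
      · exact Or.inr ⟨j, Or.inl rfl, h⟩
      · exact Or.inr ⟨i, Or.inr hi, h⟩
    · rintro (h | ⟨i, (rfl | hi), h⟩)
      · exact Or.inl (Or.inl h)
      · exact Or.inl (Or.inr h)
      · exact Or.inr ⟨i, hi, h⟩

-- B's outer loop: membership in the final substring set.
theorem mem_outer_fold {β : Type} (r : β → List Int) (f : β → Int → List Char)
    (ls : List β) (s : PySem.Set (List Char)) (x : List Char) :
    (x ∈ ls.foldl
        (fun (s : PySem.Set (List Char)) l =>
          (r l).foldl (fun (s : PySem.Set (List Char)) i => PySem.Set.add s (f l i)) s)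
        s)
      ↔ x ∈ s ∨ ∃ l ∈ ls, ∃ i ∈ r l, x = f l i := by
  induction ls generalizing s with
  | nil => simp
  | cons l ls ih =>
    simp only [List.foldl_cons, ih, mem_add_fold, List.mem_cons]
    constructor
    · rintro ((h | ⟨i, hi, h⟩) | ⟨l', hl', h⟩)
      · exact Or.inl h
      · exact Or.inr ⟨l, Or.inl rfl, i, hi, h⟩
      · exact Or.inr ⟨l', Or.inr hl', h⟩
    · rintro (h | ⟨l', (rfl | hl'), hrest⟩)
      · exact Or.inl (Or.inl h)
      · exact Or.inl (Or.inr hrest)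
      · exact Or.inr ⟨l', hl', hrest⟩

-- A keyword of a listed length is in the substring set iff it is a substring of the line.
theorem mem_subs_iff_isIn (L : List Char) (kw : List Char)
    (lens : List Int) (hlen : (kw.length : Int) ∈ lens) (hnn : ∀ l ∈ lens, 0 ≤ l) :
    (∃ l ∈ lens, ∃ i ∈ PySem.List.pyRange 0 ((L.length : Int) - l + 1) 1,
        kw = PySem.List.slice L (some i) (some (i + l)))
      ↔ PySem.Chars.isIn kw L = true := by
  rw [← PySem.Chars.exists_prefix_drop_iff_isIn]
  constructor
  · rintro ⟨l, hl, i, hi, rfl⟩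
    have h0l : 0 ≤ l := hnn l hl
    rw [PySem.List.mem_pyRange_one] at hi
    refine ⟨i.toNat, ?_⟩
    rw [PySem.List.slice_toNat L hi.1 (by omega)]
    have : (i + l).toNat - i.toNat = l.toNat := by omega
    rw [this]
    exact List.take_prefix _ _
  · rintro ⟨j, hpre⟩
    refine ⟨(kw.length : Int), hlen, ?_⟩
    have hjlen : kw.length ≤ (L.drop j).length := hpre.length_le
    rw [List.length_drop] at hjlen
    by_cases hj : j ≤ L.length
    · refine ⟨(j : Int), ?_, ?_⟩
      · rw [PySem.List.mem_pyRange_one]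
        constructor
        · positivity
        · omega
      · rw [PySem.List.slice_toNat L (by positivity) (by positivity)]
        have h2 : ((j : Int) + (kw.length : Int)).toNat - ((j : Int)).toNat = kw.length := by omega
        simp only [Int.toNat_natCast] at h2 ⊢
        rw [h2]
        exact List.prefix_iff_eq_take.mp hpre
    · -- j beyond the line: drop j = [], so kw = [] and position 0 works
      have hnil : L.drop j = [] := List.drop_eq_nil_of_le (by omega)
      have hkw : kw = [] := List.prefix_nil.mp (hnil ▸ hpre)
      subst hkw
      refine ⟨0, ?_, ?_⟩
      · rw [PySem.List.mem_pyRange_one]; simp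
      · simp only [List.length_nil, Nat.cast_zero, add_zero]
        rw [PySem.List.slice_toNat L le_rfl le_rfl]; simp

-- Filtering the keywords by membership in the substring set equals filtering by substring containment.
theorem filter_subs_eq (L : List Char) (ks : List String) :
    ks.filter
      (fun kw => PySem.Set.contains
        ((PySem.Set.ofList (ks.map (fun kw => (kw.toList.length : Int)))).foldl
          (fun (s : PySem.Set (List Char)) l =>
            (PySem.List.pyRange 0 ((L.length : Int) - l + 1) 1).foldl
              (fun (s : PySem.Set (List Char)) i =>
                PySem.Set.add s (PySem.List.slice L (some i) (some (i + l))))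
              s)
          PySem.Set.empty) kw.toList)
    = ks.filter (fun kw => PySem.Chars.isIn kw.toList L) := by
  apply List.filter_congr
  intro kw hkw
  rw [Bool.eq_iff_iff, PySem.Set.contains_iff,
    mem_outer_fold (fun l => PySem.List.pyRange 0 ((L.length : Int) - l + 1) 1)
      (fun l i => PySem.List.slice L (some i) (some (i + l)))]
  rw [← mem_subs_iff_isIn L kw.toList
    (PySem.Set.ofList (ks.map (fun kw => (kw.toList.length : Int))))
    (by rw [PySem.Set.mem_ofList]; exact List.mem_map_of_mem hkw)
    (by intro l hl
        rw [PySem.Set.mem_ofList, List.mem_map] at hl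
        obtain ⟨kw', _, rfl⟩ := hl
        positivity)]
  constructor
  · rintro (h | h)
    · exact absurd h (by simp [PySem.Set.empty])
    · exact h
  · exact Or.inr

-- ===== VERDICT (by name: the statement is the Claim_ definition above) =====
theorem score_line_spec : Claim_equal_score_line := by
  intro line keywords _
  unfold Spec_score_line score_line score_line_alt
  show (List.foldl _ ((0:Int), ([]:List String)) keywords) = _
  rw [score_line_foldl_eq]
  show _ = ((_ : Int), _)
  rw [filter_subs_eq ((PySem.Str.lower line).toList) keywords]
  simp [PySem.Str.isIn]
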